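-- pv_equiv track=rewrite | github.com/dtl29/HackerRankNotes | Cert_ProblemSolving_Inter_SubSums.py | sortedSum
-- ===== SOURCE A (Python) =====
-- def sortedSum(a):
--     # Write your code here
--     total = 0
--     for j in range(0, len(a)):
--         b = a[0:j+1]
--         b.sort()
--         for i in range(0,len(b)):
--             total += (i+1) * b[i]
--     return total  % ((10**9) +7)
-- ===== SOURCE B (Python) =====
-- def sortedSum(a):
--     # Incremental: keep the sorted prefix b and its weighted sum S; each new x
--     # is inserted once, updating S by x*(pos+1) plus the shifted suffix sum.
--     b = []
--     S = 0
--     total = 0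
--     for x in a:
--         i = 0
--         while i < len(b) and b[i] <= x:
--             i += 1
--         S += x * (i + 1) + sum(b[i:])
--         b.insert(i, x)
--         total += S
--     return total % (10**9 + 7)
-- ===== Notes on version B (the rewrite author's own statement) =====
-- stated objective: faster
-- what changed: Instead of re-sorting every prefix and recomputing its weighted sum, B maintains the sorted prefix incrementally: each new element is inserted once and the running weighted sum is updated by x*(pos+1) plus the suffix sum of displaced elements.
import Mathlib
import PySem

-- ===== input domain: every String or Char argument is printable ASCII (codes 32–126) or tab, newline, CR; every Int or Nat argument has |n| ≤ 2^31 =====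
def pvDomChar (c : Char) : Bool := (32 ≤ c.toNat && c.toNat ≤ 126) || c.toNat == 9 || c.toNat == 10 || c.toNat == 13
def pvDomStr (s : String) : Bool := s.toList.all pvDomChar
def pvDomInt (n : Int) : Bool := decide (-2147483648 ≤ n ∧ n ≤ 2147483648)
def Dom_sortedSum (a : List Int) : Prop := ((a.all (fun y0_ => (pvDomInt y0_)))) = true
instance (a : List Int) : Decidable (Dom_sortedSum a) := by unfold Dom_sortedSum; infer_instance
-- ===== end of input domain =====

-- B replaces A's sort-every-prefix loop by one incremental sorted insertion per element
-- (objective: faster — the per-prefix sort and full weighted re-summation disappear).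

-- ===== PORT A =====
def sortedSum (a : List Int) : Int :=
  let total : Int :=
    (PySem.List.pyRange 0 (a.length : Int) 1).foldl (fun total j =>
      let b := PySem.List.sorted (PySem.List.slice a (some 0) (some (j + 1))) (fun x => x) false
      (PySem.List.pyRange 0 (b.length : Int) 1).foldl
        (fun t i => t + (i + 1) * PySem.List.pyGetD b i 0) total) 0
  PySem.Int.mod total (10 ^ 9 + 7)

-- ===== PORT B =====
-- the `while i < len(b) and b[i] <= x: i += 1` scan of Source B
def pvFindPos (b : List Int) (x : Int) : Nat :=
  match b with
  | [] => 0
  | y :: t => if y ≤ x then pvFindPos t x + 1 else 0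

def sortedSum_alt (a : List Int) : Int :=
  let r :=
    a.foldl (fun (st : List Int × Int × Int) x =>
      let b := st.1
      let S := st.2.1
      let total := st.2.2
      let i := pvFindPos b x
      let S' := S + x * ((i : Int) + 1) + (PySem.List.slice b (some (i : Int)) none).sum
      (PySem.List.insert b (i : Int) x, S', total + S')) ([], 0, 0)
  PySem.Int.mod r.2.2 (10 ^ 9 + 7)

-- ===== PRECONDITION & SPEC =====
def Spec_sortedSum (a : List Int) (out : Int) : Prop := out = sortedSum_alt a
instance (a : List Int) (out : Int) : Decidable (Spec_sortedSum a out) := by unfold Spec_sortedSum; infer_instance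

-- ===== CLAIM (what is proved, stated in full; the proofs are below) =====
def Claim_equal_sortedSum : Prop := ∀ (a : List Int), Dom_sortedSum a → Spec_sortedSum a (sortedSum a)

-- ===== LEMMAS AND PROOFS =====

-- weighted sum with offset: pvW k [y0, y1, ...] = (k+1)*y0 + (k+2)*y1 + ...
def pvW (k : Int) : List Int → Int
  | [] => 0
  | y :: t => (k + 1) * y + pvW (k + 1) t

theorem pvW_succ (l : List Int) : ∀ k : Int, pvW (k + 1) l = pvW k l + l.sum := by
  induction l with
  | nil => intro k; simp [pvW]
  | cons y t ih =>
      intro k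
      simp only [pvW, List.sum_cons, ih (k + 1)]
      ring

theorem pvW_cons (k x : Int) (s : List Int) :
    pvW k (x :: s) = pvW k s + x * (k + 1) + s.sum := by
  show (k + 1) * x + pvW (k + 1) s = _
  rw [pvW_succ]
  ring

theorem pvFindPos_le (x : Int) : ∀ b : List Int, pvFindPos b x ≤ b.length := by
  intro b; induction b with
  | nil => simp [pvFindPos]
  | cons y t ih => simp only [pvFindPos, List.length_cons]; split <;> omega

-- A's inner loop equals the offset weighted sum
theorem inner_eq (b : List Int) : ∀ (c : List Int) (t : Int),
    (PySem.List.pyRange (c.length : Int) ((c.length : Int) + b.length) 1).foldl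
      (fun t i => t + (i + 1) * PySem.List.pyGetD (c ++ b) i 0) t
    = t + pvW (c.length : Int) b := by
  induction b with
  | nil => intro c t; simp [pvW]
  | cons y t' ih =>
      intro c t
      rw [PySem.List.pyRange_one_cons (by simp)]
      simp only [List.foldl_cons]
      have hget : PySem.List.pyGetD (c ++ y :: t') (c.length : Int) 0 = y := by
        rw [PySem.List.pyGetD_natCast]
        simp
      have hre : c ++ y :: t' = (c ++ [y]) ++ t' := by simp
      have hlen : ((c ++ [y]).length : Int) = (c.length : Int) + 1 := by simp
      have := ih (c ++ [y]) (t + ((c.length : Int) + 1) * y)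
      rw [hlen] at this
      rw [hget, hre]
      have harg : (c.length : Int) + ((y :: t').length : Int)
          = ((c.length : Int) + 1) + ((t' : List Int).length : Int) := by
        simp; omega
      rw [harg, this]
      simp only [pvW]
      ring

-- inserting x at pvFindPos keeps the list sorted
theorem insert_pairwise (x : Int) : ∀ (s : List Int), s.Pairwise (· ≤ ·) →
    (s.take (pvFindPos s x) ++ x :: s.drop (pvFindPos s x)).Pairwise (· ≤ ·) := by
  intro s; induction s with
  | nil => intro _; simp
  | cons y t ih =>
      intro hp
      rw [List.pairwise_cons] at hp
      by_cases h : y ≤ x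
      · simp only [pvFindPos, if_pos h, List.take_succ_cons, List.drop_succ_cons, List.cons_append]
        rw [List.pairwise_cons]
        refine ⟨?_, ih hp.2⟩
        intro z hz
        simp only [List.mem_append, List.mem_cons] at hz
        rcases hz with hz | hz | hz
        · exact hp.1 z (List.mem_of_mem_take hz)
        · omega
        · exact hp.1 z (List.mem_of_mem_drop hz)
      · simp only [pvFindPos, if_neg h, List.take_zero, List.drop_zero, List.nil_append]
        rw [List.pairwise_cons]
        refine ⟨?_, List.pairwise_cons.mpr hp⟩
        intro z hz
        simp only [List.mem_cons] at hz
        rcases hz with hz | hz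
        · omega
        · have := hp.1 z hz; omega

-- the weighted sum of the inserted list
theorem pvW_insert (x : Int) : ∀ (s : List Int) (i : Nat), i ≤ s.length → ∀ k : Int,
    pvW k (s.take i ++ x :: s.drop i)
      = pvW k s + x * (k + (i : Int) + 1) + (s.drop i).sum := by
  intro s
  induction s with
  | nil =>
      intro i hi k
      have : i = 0 := by simpa using hi
      subst this
      simp [pvW]
      ring
  | cons y t ih =>
      intro i hi k
      cases i with
      | zero =>
          simp only [List.take_zero, List.drop_zero, List.nil_append, Nat.cast_zero]
          rw [pvW_cons]
          ring
      | succ j =>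
          simp only [List.take_succ_cons, List.drop_succ_cons, List.cons_append, pvW]
          rw [ih j (by simpa using hi) (k + 1)]
          push_cast
          ring

-- sorting the extended prefix = inserting x into the sorted prefix at pvFindPos
theorem sorted_append_eq (c : List Int) (x : Int) :
    PySem.List.sorted (c ++ [x]) (fun v => v) false
      = (PySem.List.sorted c (fun v => v) false).take
          (pvFindPos (PySem.List.sorted c (fun v => v) false) x)
        ++ x :: (PySem.List.sorted c (fun v => v) false).drop
          (pvFindPos (PySem.List.sorted c (fun v => v) false) x) := by
  apply PySem.List.sorted_id_eq_of_perm_of_pairwise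
  · refine List.Perm.trans List.perm_middle ?_
    rw [List.take_append_drop]
    exact ((PySem.List.sorted_perm c (fun v => v) false).cons x).trans
      (List.perm_append_singleton x c).symm
  · exact insert_pairwise x _ (by simpa using PySem.List.sorted_pairwise c (fun v => v))

-- the outer-loop total of A before the final mod
def pvTotA (a : List Int) : Int :=
  (PySem.List.pyRange 0 (a.length : Int) 1).foldl (fun total j =>
    let b := PySem.List.sorted (PySem.List.slice a (some 0) (some (j + 1))) (fun x => x) false
    (PySem.List.pyRange 0 (b.length : Int) 1).foldl
      (fun t i => t + (i + 1) * PySem.List.pyGetD b i 0) total) 0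

-- one body of A's outer loop adds the weighted sum of the sorted prefix
theorem pvTotA_append (c : List Int) (x : Int) :
    pvTotA (c ++ [x]) = pvTotA c
      + pvW 0 (PySem.List.sorted (c ++ [x]) (fun v => v) false) := by
  unfold pvTotA
  have hlen : ((c ++ [x]).length : Int) = (c.length : Int) + 1 := by simp
  rw [hlen, PySem.List.pyRange_one_succ_right (by positivity), List.foldl_append]
  have hcong : (PySem.List.pyRange 0 (c.length : Int) 1).foldl (fun total j =>
        let b := PySem.List.sorted (PySem.List.slice (c ++ [x]) (some 0) (some (j + 1))) (fun x => x) false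
        (PySem.List.pyRange 0 (b.length : Int) 1).foldl
          (fun t i => t + (i + 1) * PySem.List.pyGetD b i 0) total) 0
      = (PySem.List.pyRange 0 (c.length : Int) 1).foldl (fun total j =>
        let b := PySem.List.sorted (PySem.List.slice c (some 0) (some (j + 1))) (fun x => x) false
        (PySem.List.pyRange 0 (b.length : Int) 1).foldl
          (fun t i => t + (i + 1) * PySem.List.pyGetD b i 0) total) 0 := by
    apply PySem.List.foldl_congr_mem
    intro acc j hj
    rw [PySem.List.mem_pyRange_one] at hj
    have hslice : PySem.List.slice (c ++ [x]) (some 0) (some (j + 1))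
        = PySem.List.slice c (some 0) (some (j + 1)) := by
      rw [PySem.List.slice_toNat _ (by omega) (by omega),
          PySem.List.slice_toNat _ (by omega) (by omega)]
      simp only [Int.toNat_zero, List.drop_zero, Nat.sub_zero]
      rw [List.take_append_of_le_length (by omega)]
    rw [hslice]
  rw [hcong]
  simp only [List.foldl_cons, List.foldl_nil]
  have hwhole : PySem.List.slice (c ++ [x]) (some 0) (some ((c.length : Int) + 1))
      = c ++ [x] := by
    rw [PySem.List.slice_toNat _ (by omega) (by omega)]
    simp
  rw [hwhole]
  have := inner_eq (PySem.List.sorted (c ++ [x]) (fun v => v) false) []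
    ((PySem.List.pyRange 0 (c.length : Int) 1).foldl (fun total j =>
        let b := PySem.List.sorted (PySem.List.slice c (some 0) (some (j + 1))) (fun x => x) false
        (PySem.List.pyRange 0 (b.length : Int) 1).foldl
          (fun t i => t + (i + 1) * PySem.List.pyGetD b i 0) total) 0)
  simpa using this

def pvStep (st : List Int × Int × Int) (x : Int) : List Int × Int × Int :=
  let i := pvFindPos st.1 x
  let S' := st.2.1 + x * ((i : Int) + 1) + (PySem.List.slice st.1 (some (i : Int)) none).sum
  (PySem.List.insert st.1 (i : Int) x, S', st.2.2 + S')

theorem invariant (a : List Int) :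
    a.foldl pvStep ([], 0, 0)
      = (PySem.List.sorted a (fun v => v) false,
         pvW 0 (PySem.List.sorted a (fun v => v) false), pvTotA a) := by
  induction a using List.reverseRecOn with
  | nil => simp [pvTotA, pvW, PySem.List.pyRange_zero_nat, PySem.List.sorted]
  | append_singleton c x ih =>
      rw [List.foldl_append, ih]
      have hle : pvFindPos (PySem.List.sorted c (fun v => v) false) x
          ≤ (PySem.List.sorted c (fun v => v) false).length := pvFindPos_le x _
      have hsorted := sorted_append_eq c x
      have hins : PySem.List.insert (PySem.List.sorted c (fun v => v) false)
          ((pvFindPos (PySem.List.sorted c (fun v => v) false) x : Nat) : Int) x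
          = (PySem.List.sorted c (fun v => v) false).take
              (pvFindPos (PySem.List.sorted c (fun v => v) false) x)
            ++ x :: (PySem.List.sorted c (fun v => v) false).drop
              (pvFindPos (PySem.List.sorted c (fun v => v) false) x) :=
        PySem.List.insert_natCast _ _ x hle
      have hslice : PySem.List.slice (PySem.List.sorted c (fun v => v) false)
          (some ((pvFindPos (PySem.List.sorted c (fun v => v) false) x : Nat) : Int)) none
          = (PySem.List.sorted c (fun v => v) false).drop
              (pvFindPos (PySem.List.sorted c (fun v => v) false) x) := by
        rw [PySem.List.slice_from _ (by positivity)]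
        simp
      simp only [List.foldl_cons, List.foldl_nil, pvStep, hins, hslice, ← hsorted,
        pvTotA_append c x, Prod.mk.injEq]
      refine ⟨trivial, ?_, ?_⟩ <;>
      · rw [hsorted, pvW_insert x _ _ hle 0]
        ring

-- ===== VERDICT (by name: the statement is the Claim_ definition above) =====
theorem sortedSum_spec : Claim_equal_sortedSum := by
  intro a _
  show sortedSum a = sortedSum_alt a
  show PySem.Int.mod (pvTotA a) (10 ^ 9 + 7)
      = PySem.Int.mod ((a.foldl pvStep ([], 0, 0)).2.2) (10 ^ 9 + 7)
  rw [invariant]
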